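-- pv_equiv track=rewrite | github.com/mahaasur13-sys/pop-os-setup | alignment/adlr.py | streak_entropy
-- ===== SOURCE A (Python) =====
-- def streak_entropy(actions: list[str]) -> int:
--     """Count TEMPORAL TRANSITIONS (not unique values)."""
--     if not actions:
--         return 0
--     count = 1
--     last = actions[0]
--     for a in actions[1:]:
--         if a != last:
--             count += 1
--             last = a
--     return count
-- ===== SOURCE B (Python) =====
-- def streak_entropy(actions: list[str]) -> int:
--     """Count TEMPORAL TRANSITIONS (not unique values).
--
--     Divide and conquer: runs(L ++ R) = runs(L) + runs(R), minus 1 when the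
--     run at the boundary is shared (last of L equals first of R)."""
--     def runs(xs: list[str]) -> int:
--         if len(xs) <= 1:
--             return len(xs)
--         m = len(xs) // 2
--         left, right = xs[:m], xs[m:]
--         return runs(left) + runs(right) - (1 if left[-1] == right[0] else 0)
--     return runs(actions)
-- ===== Notes on version B (the rewrite author's own statement) =====
-- stated objective: alternative
-- what changed: Replaces A's sequential last/count scan with a divide-and-conquer recursion: split the list in half, count runs in each half recursively, and subtract 1 when the halves share a run at the boundary (last of left == first of right).
import Mathlib
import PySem

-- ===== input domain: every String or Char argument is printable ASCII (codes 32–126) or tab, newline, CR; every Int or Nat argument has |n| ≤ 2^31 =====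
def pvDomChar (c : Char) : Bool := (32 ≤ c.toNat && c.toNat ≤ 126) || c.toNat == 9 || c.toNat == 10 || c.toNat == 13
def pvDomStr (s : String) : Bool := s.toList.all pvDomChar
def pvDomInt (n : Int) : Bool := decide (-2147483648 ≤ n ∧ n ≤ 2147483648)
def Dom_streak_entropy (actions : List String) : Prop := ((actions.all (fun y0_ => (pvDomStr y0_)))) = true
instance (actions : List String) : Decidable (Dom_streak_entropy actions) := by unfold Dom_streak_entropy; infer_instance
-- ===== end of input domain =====

-- B replaces A's sequential last/count scan with a divide-and-conquer run counter (split in half, merge with a boundary correction); same result, alternative algorithm.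


-- ===== PORT A =====
-- literal port: early return on empty, then fold carrying (count, last) over actions[1:]
def streak_entropy (actions : List String) : Int :=
  match actions with
  | [] => 0
  | a0 :: rest =>
      (rest.foldl (fun (st : Int × String) a =>
        if a ≠ st.2 then (st.1 + 1, a) else st) (1, a0)).1

-- ===== PORT B =====
-- divide and conquer: runs(xs) = runs(left half) + runs(right half) - boundary correction
def pvRunsDC (xs : List String) : Int :=
  if xs.length ≤ 1 then Int.ofNat xs.length
  else
    let m := xs.length / 2
    let left := xs.take m
    let right := xs.drop m
    pvRunsDC left + pvRunsDC right -
      (if PySem.List.pyGet? left (-1) == PySem.List.pyGet? right 0 then 1 else 0)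
termination_by xs.length
decreasing_by
  · simp only [List.length_take]; omega
  · simp only [List.length_drop]; omega

def streak_entropy_alt (actions : List String) : Int :=
  pvRunsDC actions

-- ===== PRECONDITION & SPEC =====
def Spec_streak_entropy (actions : List String) (out : Int) : Prop := out = streak_entropy_alt actions
instance (actions : List String) (out : Int) : Decidable (Spec_streak_entropy actions out) := by unfold Spec_streak_entropy; infer_instance

-- ===== CLAIM (what is proved, stated in full; the proofs are below) =====
def Claim_equal_streak_entropy : Prop := ∀ (actions : List String), Dom_streak_entropy actions → Spec_streak_entropy actions (streak_entropy actions)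

-- ===== LEMMAS AND PROOFS =====

-- transitions seen after a position holding `last`
def pvTrans (last : String) (xs : List String) : Int :=
  match xs with
  | [] => 0
  | a :: t => if a ≠ last then 1 + pvTrans a t else pvTrans last t

-- reference run count
def pvR (xs : List String) : Int :=
  match xs with
  | [] => 0
  | a :: t => 1 + pvTrans a t

theorem pvFold_eq (rest : List String) : ∀ (c : Int) (last : String),
    (rest.foldl (fun (st : Int × String) a =>
      if a ≠ st.2 then (st.1 + 1, a) else st) (c, last)).1 = c + pvTrans last rest := by
  induction rest with
  | nil => intro c last; simp [pvTrans]
  | cons a t ih =>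
      intro c last
      rw [List.foldl_cons]
      by_cases h : a = last
      · rw [if_neg (by simp [h]), ih]; simp [pvTrans, h]
      · rw [if_pos (by simp [h]), ih]
        simp only [pvTrans, if_pos (show a ≠ last from h)]
        ring

theorem pvTrans_append (ys : List String) : ∀ (xs : List String) (last : String),
    pvTrans last (xs ++ ys) = pvTrans last xs + pvTrans (xs.getLastD last) ys := by
  intro xs
  induction xs with
  | nil => intro last; simp [pvTrans]
  | cons a t ih =>
      intro last
      by_cases h : a = last
      · subst h
        simp [List.cons_append, pvTrans, ih]
        cases t <;> simp
      · simp only [List.cons_append, pvTrans, if_pos (show a ≠ last from h), ih,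
          List.getLastD_cons]
        ring

theorem pvR_append (a b : String) (t u : List String) :
    pvR ((a :: t) ++ (b :: u)) =
      pvR (a :: t) + pvR (b :: u) - (if (b :: u).head? == (a :: t).getLast? then 1 else 0) := by
  simp only [List.cons_append, pvR, pvTrans_append]
  have hlast : (a :: t).getLast? = some (t.getLastD a) := by
    induction t generalizing a with
    | nil => rfl
    | cons x xt ih => simp [List.getLast?_cons_cons, ih]
  rw [hlast]
  by_cases h : b = t.getLastD a
  · subst h
    simp only [pvTrans, List.head?_cons, beq_self_eq_true, if_pos, ne_eq, not_true_eq_false,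
      if_false]
    ring
  · have : ((some b : Option String) == some (t.getLastD a)) = false :=
      beq_eq_false_iff_ne.mpr (by simpa using h)
    simp only [pvTrans, if_pos (show b ≠ t.getLastD a from h), List.head?_cons, this,
      Bool.false_eq_true, if_false]
    ring

theorem pvRunsDC_eq (xs : List String) : pvRunsDC xs = pvR xs := by
  induction xs using pvRunsDC.induct with
  | case1 xs h =>
      rw [pvRunsDC, if_pos h]
      match xs, h with
      | [], _ => rfl
      | [a], _ => simp [pvR, pvTrans]
  | case2 xs h m left right ih1 ih2 =>
      rw [pvRunsDC, if_neg h]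
      simp only [← show m = xs.length / 2 from rfl, ← show left = xs.take m from rfl,
        ← show right = xs.drop m from rfl] at *
      have hm1 : 1 ≤ m := by have := Nat.not_le.mp h; omega
      have hmlt : m < xs.length := by have := Nat.not_le.mp h; omega
      have hleft : left ≠ [] := by
        simp only [show left = xs.take m from rfl]
        intro hc
        have := congrArg List.length hc
        simp only [List.length_take, List.length_nil] at this
        omega
      have hright : right ≠ [] := by
        simp only [show right = xs.drop m from rfl]
        intro hc
        have := congrArg List.length hc
        simp only [List.length_drop, List.length_nil] at this
        omega
      obtain ⟨a, t, hL⟩ := List.exists_cons_of_ne_nil hleft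
      obtain ⟨b, u, hR⟩ := List.exists_cons_of_ne_nil hright
      have hsplit : xs = left ++ right := by
        simp [show left = xs.take m from rfl, show right = xs.drop m from rfl]
      rw [ih1, ih2, hsplit, hL, hR, pvR_append]
      rw [PySem.List.pyGet?_neg_one]
      have : PySem.List.pyGet? (b :: u) 0 = (b :: u).head? := by
        simp
      rw [this]
      by_cases hb : (a :: t).getLast? = (b :: u).head?
      · rw [hb]
      · rw [beq_eq_false_iff_ne.mpr hb, beq_eq_false_iff_ne.mpr (Ne.symm hb)]

-- ===== VERDICT (by name: the statement is the Claim_ definition above) =====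
theorem streak_entropy_spec : Claim_equal_streak_entropy := by
  intro actions _
  unfold Spec_streak_entropy streak_entropy_alt
  rw [pvRunsDC_eq]
  cases actions with
  | nil => rfl
  | cons a0 rest =>
      show (rest.foldl _ (1, a0)).1 = _
      rw [pvFold_eq rest 1 a0]
      simp [pvR]
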